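-- pv_equiv track=rewrite | github.com/simsang1l/Programmers | python/level2/멀리_뛰기.py | solution
-- ===== SOURCE A (Python) =====
-- def factorial(n):
--     val = 1
--     if n in (0, 1):
--         return val
--     else :
--         for i in range(1, n+1):
--             val *= i
--
--     return val
--
-- def solution(n):
--     answer = 0
--     k = 1234567
--     # 2칸을 멀리뛰기를 할 수 있는 최대 횟수
--     step_2 = n//2
--
--     for i in range(step_2+1):
--         step_1 = n - (i*2)
--         val = factorial(i+step_1)//(factorial(i)*factorial(step_1))
--         answer += int(val)
--
--     answer = answer % k
--
--     return answer
-- ===== SOURCE B (Python) =====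
-- def solution(n):
--     if n < 0:
--         return 0
--     a, b = 1, 1
--     for _ in range(n):
--         a, b = b, (a + b) % 1234567
--     return a
-- ===== Notes on version B (the rewrite author's own statement) =====
-- stated objective: faster
-- what changed: Replaces the sum of factorial-quotient binomials C(n-i,i) by the equivalent iterative Fibonacci recurrence computed modulo 1234567.
import Mathlib
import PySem

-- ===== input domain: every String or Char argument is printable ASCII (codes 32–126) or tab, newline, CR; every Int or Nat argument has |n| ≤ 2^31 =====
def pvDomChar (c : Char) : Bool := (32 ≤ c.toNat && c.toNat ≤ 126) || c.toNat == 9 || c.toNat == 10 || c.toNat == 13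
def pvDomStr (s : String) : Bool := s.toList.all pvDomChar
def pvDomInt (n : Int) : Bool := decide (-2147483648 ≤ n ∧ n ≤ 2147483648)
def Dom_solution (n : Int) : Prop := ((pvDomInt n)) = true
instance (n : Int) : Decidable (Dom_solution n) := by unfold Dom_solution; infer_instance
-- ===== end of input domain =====

-- B replaces A's factorial-quotient binomial sum by an O(n) modular Fibonacci loop (faster).

-- ===== PORT A =====
def pyFactorial (n : Int) : Int :=
  let val : Int := 1
  if n = 0 ∨ n = 1 then val
  else (PySem.List.pyRange 1 (n + 1) 1).foldl (fun val i => val * i) val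

def solution (n : Int) : Int :=
  let answer : Int := 0
  let k : Int := 1234567
  let step_2 := PySem.Int.floordiv n 2
  let answer := (PySem.List.pyRange 0 (step_2 + 1) 1).foldl
    (fun answer i =>
      let step_1 := n - i * 2
      let val := PySem.Int.floordiv (pyFactorial (i + step_1))
        (pyFactorial i * pyFactorial step_1)
      answer + val) answer
  PySem.Int.mod answer k

-- ===== PORT B =====
def solution_alt (n : Int) : Int :=
  if n < 0 then 0
  else
    ((PySem.List.pyRange 0 n 1).foldl
      (fun (ab : Int × Int) _ => (ab.2, PySem.Int.mod (ab.1 + ab.2) 1234567))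
      (1, 1)).1

-- ===== PRECONDITION & SPEC =====
def Spec_solution (n : Int) (out : Int) : Prop := out = solution_alt n
instance (n : Int) (out : Int) : Decidable (Spec_solution n out) := by unfold Spec_solution; infer_instance

-- ===== CLAIM (what is proved, stated in full; the proofs are below) =====
def Claim_equal_solution : Prop := ∀ (n : Int), Dom_solution n → Spec_solution n (solution n)

-- ===== LEMMAS AND PROOFS =====

-- the range(1, m+1) product in pyFactorial is m!
lemma prod_range_eq_factorial (m : Nat) :
    (PySem.List.pyRange 1 ((m : Int) + 1) 1).foldl (fun val i => val * i) 1
      = (Nat.factorial m : Int) := by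
  induction m with
  | zero =>
    rw [show ((0:Nat):Int) + 1 = 1 by norm_num,
      PySem.List.pyRange_one_eq_nil le_rfl]
    simp [Nat.factorial]
  | succ t ih =>
    have hc : ((t+1:Nat):Int) + 1 = ((t:Int) + 1) + 1 := by push_cast; ring
    have h : (PySem.List.pyRange 1 (((t:Int)+1) + 1) 1)
        = PySem.List.pyRange 1 ((t:Int)+1) 1 ++ [(t:Int)+1] :=
      PySem.List.pyRange_one_succ_right (by omega)
    rw [hc, h, List.foldl_append, ih, List.foldl_cons, List.foldl_nil,
      Nat.factorial_succ]
    push_cast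
    ring

lemma pyFactorial_natCast (m : Nat) : pyFactorial (m : Int) = (Nat.factorial m : Int) := by
  unfold pyFactorial
  rcases Nat.lt_or_ge m 2 with h | h
  · interval_cases m <;> simp [Nat.factorial]
  · rw [if_neg (by omega)]
    exact prod_range_eq_factorial m

-- one loop term of A is the binomial coefficient C(m-j, j)
lemma term_eq_choose (m j : Nat) (hj : 2 * j ≤ m) :
    PySem.Int.floordiv (pyFactorial ((j:Int) + ((m:Int) - (j:Int) * 2)))
        (pyFactorial (j:Int) * pyFactorial ((m:Int) - (j:Int) * 2))
      = ((Nat.choose (m - j) j : Nat) : Int) := by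
  have h1 : (j:Int) + ((m:Int) - (j:Int) * 2) = ((m - j : Nat) : Int) := by
    push_cast [Nat.cast_sub (by omega : j ≤ m)]; ring
  have h2 : ((m:Int) - (j:Int) * 2) = ((m - 2 * j : Nat) : Int) := by
    push_cast [Nat.cast_sub hj]; ring
  rw [h1, h2, pyFactorial_natCast, pyFactorial_natCast, pyFactorial_natCast,
    ← Nat.cast_mul, PySem.Int.floordiv_natCast]
  congr 1
  have := Nat.add_choose (m - 2 * j) j
  have hmj : m - 2 * j + j = m - j := by omega
  rw [hmj] at this
  rw [mul_comm (Nat.factorial j)]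
  omega

-- A's loop computes the truncated binomial sum
lemma loopA (m : Nat) (t : Nat) (ht : t ≤ m / 2 + 1) :
    (PySem.List.pyRange 0 (t : Int) 1).foldl
      (fun answer i =>
        answer + PySem.Int.floordiv (pyFactorial (i + ((m:Int) - i * 2)))
          (pyFactorial i * pyFactorial ((m:Int) - i * 2)))
      0
    = ((∑ j ∈ Finset.range t, Nat.choose (m - j) j : Nat) : Int) := by
  induction t with
  | zero =>
    rw [show ((0:Nat):Int) = 0 from rfl, PySem.List.pyRange_one_eq_nil le_rfl]
    simp
  | succ s ih =>
    have hc : ((s+1:Nat):Int) = (s:Int) + 1 := by push_cast; ring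
    have h : (PySem.List.pyRange 0 ((s:Int)+1) 1)
        = PySem.List.pyRange 0 (s:Int) 1 ++ [(s:Int)] :=
      PySem.List.pyRange_one_succ_right (by omega)
    have hs : 2 * s ≤ m := by omega
    rw [hc, h, List.foldl_append, ih (by omega), List.foldl_cons, List.foldl_nil,
      term_eq_choose m s hs, Finset.sum_range_succ]
    push_cast
    ring

-- the truncated sum extends to the full sum (the extra terms vanish), and equals fib
lemma sum_eq_fib (m : Nat) :
    (∑ j ∈ Finset.range (m / 2 + 1), Nat.choose (m - j) j) = Nat.fib (m + 1) := by
  have htr : (∑ j ∈ Finset.range (m / 2 + 1), Nat.choose (m - j) j)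
      = ∑ j ∈ Finset.range (m + 1), Nat.choose (m - j) j := by
    apply Finset.sum_subset
    · intro x hx
      simp only [Finset.mem_range] at hx ⊢
      omega
    · intro j hj hj2
      simp only [Finset.mem_range, not_lt] at hj hj2
      exact Nat.choose_eq_zero_of_lt (by omega)
  rw [htr, Nat.fib_succ_eq_sum_choose, Finset.Nat.sum_antidiagonal_eq_sum_range_succ_mk]
  simp only
  rw [← Finset.sum_range_reflect]
  apply Finset.sum_congr rfl
  intro j hj
  simp only [Finset.mem_range] at hj
  congr 1; omega

-- B's loop invariant: after t steps the pair is (fib(t+1) % K, fib(t+2) % K)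
lemma loopB (t : Nat) :
    (PySem.List.pyRange 0 (t : Int) 1).foldl
      (fun (ab : Int × Int) _ => (ab.2, PySem.Int.mod (ab.1 + ab.2) 1234567))
      (1, 1)
    = (((Nat.fib (t + 1) % 1234567 : Nat) : Int), ((Nat.fib (t + 2) % 1234567 : Nat) : Int)) := by
  induction t with
  | zero =>
    rw [show ((0:Nat):Int) = 0 from rfl, PySem.List.pyRange_one_eq_nil le_rfl]
    norm_num [Nat.fib]
  | succ s ih =>
    have hc : ((s+1:Nat):Int) = (s:Int) + 1 := by push_cast; ring
    have h : (PySem.List.pyRange 0 ((s:Int)+1) 1)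
        = PySem.List.pyRange 0 (s:Int) 1 ++ [(s:Int)] :=
      PySem.List.pyRange_one_succ_right (by omega)
    rw [hc, h, List.foldl_append, ih, List.foldl_cons, List.foldl_nil]
    have hfib : Nat.fib (s + 3) = Nat.fib (s + 1) + Nat.fib (s + 2) := by
      rw [show s + 3 = (s + 1) + 2 by ring, Nat.fib_add_two]
    have hmod : PySem.Int.mod (((Nat.fib (s + 1) % 1234567 : Nat) : Int)
        + ((Nat.fib (s + 2) % 1234567 : Nat) : Int)) 1234567
        = ((Nat.fib (s + 3) % 1234567 : Nat) : Int) := by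
      rw [PySem.Int.mod_eq_emod_of_pos (by norm_num), hfib]
      omega
    rw [hmod]

lemma solution_nonneg_eq (m : Nat) : solution (m : Int) = solution_alt (m : Int) := by
  unfold solution solution_alt
  simp only
  rw [if_neg (by omega)]
  have hstep : PySem.Int.floordiv (m : Int) 2 = ((m / 2 : Nat) : Int) := by
    exact_mod_cast PySem.Int.floordiv_natCast m 2
  rw [hstep]
  have hA := loopA m (m / 2 + 1) (le_refl _)
  rw [show ((m / 2 + 1 : Nat):Int) = ((m / 2 : Nat):Int) + 1 by push_cast; ring] at hA
  rw [hA, sum_eq_fib, loopB m]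
  simp only
  rw [PySem.Int.mod_eq_emod_of_pos (by norm_num)]
  omega

lemma solution_neg_eq (n : Int) (hn : n < 0) : solution n = solution_alt n := by
  unfold solution solution_alt
  simp only
  rw [if_pos hn]
  have h2 : PySem.Int.floordiv n 2 < 0 := by
    rw [PySem.Int.floordiv_lt_iff_lt_mul (by norm_num)]; omega
  rw [PySem.List.pyRange_one_eq_nil (by omega), List.foldl_nil,
    PySem.Int.mod_eq_emod_of_pos (by norm_num)]
  norm_num

-- ===== VERDICT (by name: the statement is the Claim_ definition above) =====
theorem solution_spec : Claim_equal_solution := by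
  intro n _
  unfold Spec_solution
  by_cases h : 0 ≤ n
  · obtain ⟨m, rfl⟩ := Int.eq_ofNat_of_zero_le h
    exact solution_nonneg_eq m
  · exact solution_neg_eq n (by omega)
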